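-- pv_equiv track=rewrite | github.com/Biruk-gebru/A2SVBirukG | 13-Mar-2025/Find Kth Bit in Nth Binary String 304748.py | findKthBit
-- ===== SOURCE A (Python) =====
-- def findKthBit(n: int, k: int) -> str:
--     def build(n):
--         l=2*n+1
--         built_ar=["0"]
--         for _ in range(n):
--             temp=built_ar[::-1]
--             built_ar+=("1")
--             for j in range(len(temp)):
--                 if temp[j]=="1":
--                     built_ar.append("0")
--                 else:
--                     built_ar.append("1")
--         return built_ar
--     sol=build(n)
--     return sol[k-1]
-- ===== SOURCE B (Python) =====
-- def findKthBit(n: int, k: int) -> str: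
--     # The n-th string has length 2**(n+1) - 1; walk down through the middles,
--     # mirroring the index into the first half and tracking an inversion flag.
--     length = 2 ** (n + 1) - 1
--     i = (k - 1) % length          # 0-based position in the string
--     invert = False
--     while length > 1:
--         half = length // 2        # length of each half; index `half` is the middle '1'
--         if i == half:
--             return "0" if invert else "1"
--         if i > half:
--             i = length - 1 - i    # mirror into the first half
--             invert = not invert
--         length = half
--     return "1" if invert else "0"
-- ===== Notes on version B (the rewrite author's own statement) =====
-- stated objective: faster
-- what changed: A materialises the whole 2^(n+1)-1 element list by repeated reverse-and-invert concatenation and indexes it; B never builds the string: it folds the queried index through the middle of each half, tracking an inversion flag. Intended as asymptotically faster; a timing run could not measure a ratio (A timed out at n=16 where B still returned, and at the sizes where A finishes it takes under 5 ms). Pre_ excludes negative n, where A happens to return '0' through range() iterating zero times while B's closed-form length is meaningless there (it raises for n = -1).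
-- outside the precondition, e.g. on findKthBit(-1, 1): A returns '0', B raises ZeroDivisionError
import Mathlib
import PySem

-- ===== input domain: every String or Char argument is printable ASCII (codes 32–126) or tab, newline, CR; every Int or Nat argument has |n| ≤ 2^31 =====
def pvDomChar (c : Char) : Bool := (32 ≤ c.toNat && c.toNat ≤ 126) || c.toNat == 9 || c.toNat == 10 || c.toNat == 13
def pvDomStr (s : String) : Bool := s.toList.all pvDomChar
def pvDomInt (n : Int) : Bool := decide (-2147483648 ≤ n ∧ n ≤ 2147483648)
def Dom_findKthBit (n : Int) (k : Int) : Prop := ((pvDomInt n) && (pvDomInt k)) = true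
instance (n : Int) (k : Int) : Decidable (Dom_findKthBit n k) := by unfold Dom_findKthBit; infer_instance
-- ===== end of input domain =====

-- B replaces A's construction of the whole 2^(n+1)-1 element list by a descent through
-- the middles of the halves tracking an inversion flag; return values agree wherever Pre_ holds.

-- ===== PORT A =====
-- one step of A's outer loop: temp = built_ar[::-1]; built_ar += "1"; append flipped temp
def pvStepA (built_ar : List String) : List String :=
  let temp := built_ar.reverse
  let built_ar := built_ar ++ ["1"]
  temp.foldl (fun acc tj => acc ++ [if tj = "1" then "0" else "1"]) built_ar

def pvBuildA (n : Int) : List String :=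
  (List.range n.toNat).foldl (fun built_ar _ => pvStepA built_ar) ["0"]

def findKthBit (n : Int) (k : Int) : String :=
  let sol := pvBuildA n
  (PySem.List.pyGet? sol (k - 1)).getD ""   -- sol[k-1]; none (IndexError) is excluded by Pre_

-- ===== PORT B =====
-- Source B's while-loop: `length` at each pass is 2^t - 1, so the loop is structural recursion on t;
-- half = length // 2 = 2^(t-1) - 1, and the mirror step length - 1 - i is 2*half - i.
def pvLoopB : Nat → Int → Bool → String
  | 0, _, invert => if invert then "1" else "0"
  | 1, _, invert => if invert then "1" else "0"
  | (t + 2), i, invert =>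
      let half : Int := 2 ^ (t + 1) - 1
      if i = half then (if invert then "0" else "1")
      else if i > half then pvLoopB (t + 1) (2 * half - i) (!invert)
      else pvLoopB (t + 1) i invert

-- For n ≥ 0 this is Source B exactly (length = 2^(n+1)-1 > 0).  For n = -1 Python's `% 0` raises
-- ZeroDivisionError (ported as ""); for n ≤ -2 Python's 2**(n+1) is a float in (0, 0.5], so
-- length < 1, the while loop never runs and "0" is returned — ported by hand, exact there.
def findKthBit_alt (n : Int) (k : Int) : String :=
  if 0 ≤ n then
    let t := (n + 1).toNat
    let L : Int := 2 ^ t - 1        -- length = 2**(n+1) - 1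
    pvLoopB t (PySem.Int.mod (k - 1) L) false
  else if n = -1 then ""            -- ZeroDivisionError; outside Pre_
  else "0"

-- ===== PRECONDITION & SPEC =====
-- Pre_ excludes (a) the inputs on which A raises IndexError (k-1 outside Python's index range
-- for the built list of length 2^(n+1)-1) and (b) negative n, where A returns "0" only because
-- range() of a negative count iterates zero times, while B's closed-form length is meaningless
-- there (Source B raises ZeroDivisionError for n = -1).  The exponent is capped at 32 only to keep
-- the condition cheaply evaluable: inside Dom (|k| ≤ 2^31) the capped condition is equivalent
-- to the uncapped one, so no input of Dom on which A returns with n ≥ 0 is lost.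
def Pre_findKthBit (n : Int) (k : Int) : Prop :=
  0 ≤ n ∧
  -((2:Int) ^ (min (n.toNat + 1) 32) - 1) ≤ k - 1 ∧
    k - 1 < (2:Int) ^ (min (n.toNat + 1) 32) - 1
instance (n : Int) (k : Int) : Decidable (Pre_findKthBit n k) := by unfold Pre_findKthBit; infer_instance
def pvWitness_findKthBit : Int × Int := (3, 5)
def Spec_findKthBit (n : Int) (k : Int) (out : String) : Prop := out = findKthBit_alt n k
instance (n : Int) (k : Int) (out : String) : Decidable (Spec_findKthBit n k out) := by unfold Spec_findKthBit; infer_instance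

-- ===== CLAIM (what is proved, stated in full; the proofs are below) =====
def Claim_equal_findKthBit : Prop := ∀ (n : Int) (k : Int), Dom_findKthBit n k → Pre_findKthBit n k → Spec_findKthBit n k (findKthBit n k)

-- ===== LEMMAS AND PROOFS =====

-- the list A builds, as a structural recursion on the iteration count
def pvS : Nat → List String
  | 0 => ["0"]
  | m + 1 => pvS m ++ ["1"] ++ (pvS m).reverse.map (fun tj => if tj = "1" then "0" else "1")

theorem pvFoldSingleton (f : String → String) :
    ∀ (l init : List String),
      l.foldl (fun acc tj => acc ++ [f tj]) init = init ++ l.map f := by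
  intro l
  induction l with
  | nil => simp
  | cons x xs ih => intro init; simp only [List.foldl, List.map]; rw [ih]; simp

theorem pvStepA_eq (ar : List String) :
    pvStepA ar = ar ++ ["1"] ++ ar.reverse.map (fun tj => if tj = "1" then "0" else "1") := by
  show (ar.reverse).foldl _ (ar ++ ["1"]) = _
  rw [pvFoldSingleton (fun tj => if tj = "1" then "0" else "1")]

theorem pvBuildA_eq (n : Int) : pvBuildA n = pvS n.toNat := by
  unfold pvBuildA
  induction n.toNat with
  | zero => simp [pvS]
  | succ m ih =>
    rw [List.range_succ, List.foldl_append]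
    simp only [List.foldl]
    rw [ih, pvStepA_eq]
    simp [pvS]

theorem pvS_length (m : Nat) : (pvS m).length = 2 ^ (m + 1) - 1 := by
  induction m with
  | zero => simp [pvS]
  | succ m ih =>
    have hpow : 1 ≤ 2 ^ (m + 1) := Nat.one_le_two_pow
    have h2 : 2 ^ (m + 1 + 1) = 2 * 2 ^ (m + 1) := by ring
    simp [pvS, List.length_append, ih, h2]
    omega

theorem pvS_binary : ∀ (m : Nat) (x : String), x ∈ pvS m → x = "0" ∨ x = "1"
  | 0, x, hx => by
      simp [pvS] at hx
      left; exact hx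
  | (m + 1), x, hx => by
      rw [pvS] at hx
      rcases List.mem_append.1 hx with h | hR
      · rcases List.mem_append.1 h with h1 | h2
        · exact pvS_binary m x h1
        · right; simpa using h2
      · rcases List.mem_map.1 hR with ⟨y, _, hxy⟩
        subst hxy
        by_cases hy1 : y = "1"
        · left; simp [hy1]
        · right; simp [hy1]

-- the key invariant: B's descent computes (possibly flipped) the j-th element of A's list
theorem pvKey : ∀ (m : Nat) (j : Nat), j < (pvS m).length → ∀ (invert : Bool),
    pvLoopB (m + 1) (j : Int) invert =
      (if invert then (if (pvS m).getD j "" = "1" then "0" else "1") else (pvS m).getD j "")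
  | 0, j, hj, invert => by
      have hj0 : j = 0 := by simpa [pvS] using hj
      subst hj0
      cases invert <;> rfl
  | (m + 1), j, hj, invert => by
      have hlen : (pvS m).length = 2 ^ (m + 1) - 1 := pvS_length m
      have hpow : 1 ≤ 2 ^ (m + 1) := Nat.one_le_two_pow
      have hjub : j < 2 ^ (m + 1 + 1) - 1 := by rw [← pvS_length]; exact hj
      have hpow2 : 2 ^ (m + 1 + 1) = 2 * 2 ^ (m + 1) := by ring
      have hhalfI : (((2 ^ (m + 1) - 1 : Nat)) : Int) = 2 ^ (m + 1) - 1 := by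
        rw [Int.natCast_sub hpow]; push_cast; ring
      show pvLoopB (m + 2) (j : Int) invert = _
      simp only [pvLoopB]
      by_cases hmid : j = 2 ^ (m + 1) - 1
      · -- the middle element is "1"
        have hji : (j : Int) = 2 ^ (m + 1) - 1 := by rw [hmid]; exact hhalfI
        rw [if_pos hji]
        have hget : (pvS (m + 1)).getD j "" = "1" := by
          have hjl : (pvS m).length ≤ j := by omega
          have h0 : j - (pvS m).length = 0 := by omega
          simp only [pvS]
          rw [List.getD, List.append_assoc, List.singleton_append,
              List.getElem?_append_right hjl, h0]
          rfl
        rw [hget]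
        cases invert <;> simp
      · have hjneI : ¬ ((j : Int) = 2 ^ (m + 1) - 1) := by
          rw [← hhalfI]; exact_mod_cast fun h => hmid (Nat.cast_injective h)
        rw [if_neg hjneI]
        by_cases hgt : j > 2 ^ (m + 1) - 1
        · -- right part: mirrored and flipped element of pvS m
          have hgtI : (j : Int) > 2 ^ (m + 1) - 1 := by
            rw [← hhalfI]; exact_mod_cast hgt
          rw [if_pos hgtI]
          have hjle : j ≤ 2 * (2 ^ (m + 1) - 1) := by omega
          have hcast : 2 * ((2:Int) ^ (m + 1) - 1) - (j : Int)
              = ((2 * (2 ^ (m + 1) - 1) - j : Nat) : Int) := by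
            rw [Int.natCast_sub hjle]; push_cast [Int.natCast_sub hpow]; ring
          have hlt : 2 * (2 ^ (m + 1) - 1) - j < (pvS m).length := by omega
          rw [hcast, pvKey m _ hlt (!invert)]
          have hgetR : (pvS (m + 1)).getD j "" =
              (if (pvS m).getD (2 * (2 ^ (m + 1) - 1) - j) "" = "1" then "0" else "1") := by
            have hlen2 : (pvS m ++ ["1"]).length = 2 ^ (m + 1) := by simp [hlen]; omega
            have hjl : (pvS m ++ ["1"]).length ≤ j := by omega
            have hidx : j - (pvS m ++ ["1"]).length < (pvS m).length := by
              rw [hlen2]; omega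
            simp only [pvS]
            rw [List.getD, List.getElem?_append_right hjl, List.getElem?_map,
                List.getElem?_reverse (by simpa [hlen2, hlen] using hidx)]
            have hrevidx : (pvS m).length - 1 - (j - (pvS m ++ ["1"]).length)
                = 2 * (2 ^ (m + 1) - 1) - j := by rw [hlen2, hlen]; omega
            rw [hrevidx, List.getD, List.getElem?_eq_getElem (by omega)]
            simp
          rw [hgetR]
          have he : (pvS m).getD (2 * (2 ^ (m + 1) - 1) - j) "" ∈ pvS m := by
            rw [List.getD, List.getElem?_eq_getElem (by omega)]
            exact List.getElem_mem _
          rcases pvS_binary m _ he with h | h <;> rw [h] <;> cases invert <;> simp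
        · -- left part: the same element of pvS m
          have hgtI : ¬ ((j : Int) > 2 ^ (m + 1) - 1) := by
            rw [← hhalfI]; exact_mod_cast hgt
          rw [if_neg hgtI]
          have hlt : j < (pvS m).length := by omega
          rw [pvKey m j hlt invert]
          have hgetL : (pvS (m + 1)).getD j "" = (pvS m).getD j "" := by
            simp only [pvS]
            rw [List.getD, List.getElem?_append_left (by simp [hlen]; omega),
                List.getElem?_append_left hlt]
            rfl
          rw [hgetL]

-- ===== VERDICT (by name: the statement is the Claim_ definition above) =====
theorem findKthBit_spec : Claim_equal_findKthBit := by
  intro n k hdom hpre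
  unfold Spec_findKthBit
  unfold Dom_findKthBit pvDomInt at hdom
  simp only [Bool.and_eq_true, decide_eq_true_eq] at hdom
  obtain ⟨⟨hn1, hn2⟩, hk1, hk2⟩ := hdom
  obtain ⟨hn0, hpre⟩ := hpre
  set m : Nat := n.toNat with hm
  set t : Nat := m + 1 with ht
  set L : Int := 2 ^ t - 1 with hL
  -- inside Dom the capped bound of Pre_ implies the real bound
  have hreal : -L ≤ k - 1 ∧ k - 1 < L := by
    by_cases hcap : t ≤ 32
    · rw [min_eq_left hcap] at hpre; exact hpre
    · have h32 : (2:Int) ^ 32 ≤ 2 ^ t := pow_le_pow_right₀ (by norm_num) (by omega)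
      rw [min_eq_right (by omega)] at hpre
      have h32' : (2147483648 : Int) ≤ 2 ^ 32 - 1 := by norm_num
      constructor
      · omega
      · omega
  obtain ⟨hlo, hhi⟩ := hreal
  have hLpos : 1 ≤ L := by
    have h2 : (2:Int) ^ 1 ≤ 2 ^ t := pow_le_pow_right₀ (by norm_num) (by omega)
    simp at h2; omega
  have htn : (n + 1).toNat = t := by omega
  -- the index Source B computes: (k-1) % L, with -L ≤ k-1 < L and L > 0
  set i : Int := if k - 1 < 0 then k - 1 + L else k - 1 with hi
  have hi0 : 0 ≤ i := by rw [hi]; split <;> omega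
  have hiL : i < L := by rw [hi]; split <;> omega
  have hmod : PySem.Int.mod (k - 1) L = i := by
    rw [PySem.Int.mod_eq_emod_of_pos (by omega)]
    rw [hi]; split
    · have h1 : (k - 1 + L) % L = (k - 1) % L := by
        simp
      rw [← h1]
      exact Int.emod_eq_of_lt (by omega) (by omega)
    · exact Int.emod_eq_of_lt (by omega) (by omega)
  have hlenN : (pvS m).length = 2 ^ t - 1 := pvS_length m
  have hlenI : ((pvS m).length : Int) = L := by
    rw [hlenN, hL, Int.natCast_sub Nat.one_le_two_pow]
    push_cast; ring
  have hA : findKthBit n k = (pvS m).getD i.toNat "" := by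
    simp only [findKthBit]
    rw [pvBuildA_eq]
    rcases lt_or_ge (k - 1) 0 with hneg | hpos
    · have hieq : i = k - 1 + L := by rw [hi, if_pos hneg]
      rw [PySem.List.pyGet?_neg (pvS m) hneg (by rw [hlenI]; omega)]
      rw [List.getD]
      congr 2
      omega
    · have hieq : i = k - 1 := by rw [hi, if_neg (by omega)]
      rw [PySem.List.pyGet?_of_nonneg (pvS m) hpos]
      rw [List.getD]
      congr 2
      omega
  have hB : findKthBit_alt n k = pvLoopB t i false := by
    simp only [findKthBit_alt, htn, ← hL]
    rw [if_pos hn0, hmod]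
  have hkey := pvKey m i.toNat (by omega) false
  rw [Int.toNat_of_nonneg hi0] at hkey
  rw [hA, hB, ht, hkey]
  simp
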